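-- pv_equiv track=rewrite | github.com/toddwbucy/HADES | core/processors/text/chunking_strategies.py | _prefix_char_offsets
-- ===== SOURCE A (Python) =====
-- def _prefix_char_offsets(tokens: list[str]) -> list[int]:
--     """Return cumulative character offsets for whitespace-joined tokens."""
--     if not tokens:
--         return [0]
--
--     offsets = [0]
--     total = 0
--     for idx, token in enumerate(tokens):
--         if idx:
--             total += 1  # account for the single space we insert between tokens
--         total += len(token)
--         offsets.append(total)
--     return offsets
-- ===== SOURCE B (Python) =====
-- def _prefix_char_offsets(tokens: list[str]) -> list[int]:
--     """Return cumulative character offsets for whitespace-joined tokens."""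
--     return [len(" ".join(tokens[:i])) for i in range(len(tokens) + 1)]
-- ===== Notes on version B (the rewrite author's own statement) =====
-- stated objective: simpler
-- what changed: Replaces the running-total accumulator loop with a one-line comprehension computing each offset directly as the length of the whitespace-joined prefix.
import Mathlib
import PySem

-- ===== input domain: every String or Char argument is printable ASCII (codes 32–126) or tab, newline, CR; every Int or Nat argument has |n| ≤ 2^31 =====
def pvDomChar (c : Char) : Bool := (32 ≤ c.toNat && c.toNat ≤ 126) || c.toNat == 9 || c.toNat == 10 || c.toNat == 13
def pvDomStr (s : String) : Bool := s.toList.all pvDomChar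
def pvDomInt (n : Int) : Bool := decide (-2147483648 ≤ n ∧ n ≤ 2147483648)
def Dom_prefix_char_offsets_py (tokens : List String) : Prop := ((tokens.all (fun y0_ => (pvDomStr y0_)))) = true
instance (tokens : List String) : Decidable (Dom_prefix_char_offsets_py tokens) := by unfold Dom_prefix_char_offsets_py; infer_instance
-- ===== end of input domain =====

-- B replaces A's running-total loop by a direct comprehension: each offset is the length
-- of the whitespace-joined prefix (simpler; not faster).

-- ===== PORT A =====
-- literal port of A's loop: enumerate, running total, append each iteration
def prefix_char_offsets_py (tokens : List String) : List Int :=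
  if tokens = [] then [0]
  else
    let st := (PySem.List.enumerate tokens).foldl
      (fun (s : List Int × Int) p =>
        (s.1 ++ [(if p.1 ≠ 0 then s.2 + 1 else s.2) + PySem.Str.len p.2],
         (if p.1 ≠ 0 then s.2 + 1 else s.2) + PySem.Str.len p.2)) ([0], 0)
    st.1

-- ===== PORT B =====
-- literal port of B: [len(" ".join(tokens[:i])) for i in range(len(tokens)+1)]
def prefix_char_offsets_py_alt (tokens : List String) : List Int :=
  (PySem.List.pyRange 0 ((tokens.length : Int) + 1) 1).map
    (fun i => PySem.Str.len (PySem.Str.join " " (PySem.List.slice tokens none (some i))))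

-- ===== PRECONDITION & SPEC =====
def Spec_prefix_char_offsets_py (tokens : List String) (out : List Int) : Prop := out = prefix_char_offsets_py_alt tokens
instance (tokens : List String) (out : List Int) : Decidable (Spec_prefix_char_offsets_py tokens out) := by unfold Spec_prefix_char_offsets_py; infer_instance

-- ===== CLAIM (what is proved, stated in full; the proofs are below) =====
def Claim_equal_prefix_char_offsets_py : Prop := ∀ (tokens : List String), Dom_prefix_char_offsets_py tokens → Spec_prefix_char_offsets_py tokens (prefix_char_offsets_py tokens)

-- ===== LEMMAS AND PROOFS =====

-- length of one token, as A's loop counts it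
def pvL (t : String) : Int := PySem.Str.len t

-- length of the " "-joined list, as B computes it
def pvJ (xs : List String) : Int := PySem.Str.len (PySem.Str.join " " xs)

-- the tail of offsets A's loop produces from a running total, once idx > 0
def pvP : List String → Int → List Int
  | [], _ => []
  | t :: r, total => (total + 1 + pvL t) :: pvP r (total + 1 + pvL t)

-- the final running total of that loop
def pvPlast : List String → Int → Int
  | [], total => total
  | t :: r, total => pvPlast r (total + 1 + pvL t)

theorem pvJ_nil : pvJ [] = 0 := by decide

theorem pvJ_singleton (t : String) : pvJ [t] = pvL t := by
  simp [pvJ, pvL, PySem.Str.len, PySem.Str.join, PySem.Chars.join_singleton]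

theorem pvJ_cons_cons (a b : String) (r : List String) :
    pvJ (a :: b :: r) = pvL a + 1 + pvJ (b :: r) := by
  simp [pvJ, pvL, PySem.Str.len, PySem.Str.join, PySem.Chars.join_cons_cons]
  ring

theorem pvJ_append_singleton (a : List String) (u : String) (ha : a ≠ []) :
    pvJ (a ++ [u]) = pvJ a + 1 + pvL u := by
  induction a with
  | nil => exact absurd rfl ha
  | cons x r ih =>
    cases r with
    | nil =>
      simp only [List.cons_append, List.nil_append]
      rw [pvJ_cons_cons, pvJ_singleton, pvJ_singleton]
    | cons y s =>
      have ih' := ih (by simp)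
      simp only [List.cons_append] at ih' ⊢
      rw [pvJ_cons_cons, pvJ_cons_cons x y s, ih']
      ring

theorem pvFoldA (ts : List String) : ∀ (s : Int) (offs : List Int) (total : Int), 1 ≤ s →
    (PySem.List.enumerate ts s).foldl
      (fun (st : List Int × Int) p =>
        (st.1 ++ [(if p.1 ≠ 0 then st.2 + 1 else st.2) + PySem.Str.len p.2],
         (if p.1 ≠ 0 then st.2 + 1 else st.2) + PySem.Str.len p.2)) (offs, total)
    = (offs ++ pvP ts total, pvPlast ts total) := by
  induction ts with
  | nil => intro s offs total hs; simp [PySem.List.enumerate_nil, pvP, pvPlast]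
  | cons t r ih =>
    intro s offs total hs
    rw [PySem.List.enumerate_cons, List.foldl_cons]
    have hne : s ≠ 0 := by omega
    simp only [hne, ne_eq, not_false_eq_true, if_true]
    rw [ih (s + 1) _ _ (by omega)]
    simp [pvP, pvPlast, pvL, List.append_assoc]

theorem pvRangeMap (ts : List String) : ∀ (a : List String), a ≠ [] →
    (List.range ts.length).map (fun k => pvJ (a ++ ts.take (k + 1))) = pvP ts (pvJ a) := by
  induction ts with
  | nil => intro a _; simp [pvP]
  | cons u r ih =>
    intro a ha
    rw [List.length_cons, List.range_succ_eq_map]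
    simp only [List.map_cons, List.map_map]
    rw [pvP]
    congr 1
    · simp [pvJ_append_singleton a u ha]
    · rw [← pvJ_append_singleton a u ha, ← ih (a ++ [u]) (by simp)]
      apply List.map_congr_left
      intro k _
      simp [Function.comp, List.take_succ_cons, List.append_assoc]

theorem pvRHS (t : String) (r : List String) :
    (List.range (r.length + 1)).map (fun k => pvJ ((t :: r).take (k + 1)))
      = pvL t :: pvP r (pvL t) := by
  rw [List.range_succ_eq_map, List.map_cons, List.map_map]
  congr 1
  · simp [pvJ_singleton]
  · rw [← pvJ_singleton t, ← pvRangeMap r [t] (by simp)]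
    apply List.map_congr_left
    intro k _
    simp [Function.comp, List.take_succ_cons]

theorem pvAltChar (tokens : List String) :
    prefix_char_offsets_py_alt tokens
      = (List.range (tokens.length + 1)).map (fun k => pvJ (tokens.take k)) := by
  unfold prefix_char_offsets_py_alt
  rw [PySem.List.pyRange_one, List.map_map]
  have hn : (((tokens.length : Int) + 1 - 0).toNat) = tokens.length + 1 := by omega
  rw [hn]
  apply List.map_congr_left
  intro k _
  simp [Function.comp, PySem.List.slice_to_natCast, pvJ]

theorem prefix_char_offsets_py_eq (tokens : List String) :
    prefix_char_offsets_py tokens = prefix_char_offsets_py_alt tokens := by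
  rw [pvAltChar]
  unfold prefix_char_offsets_py
  cases tokens with
  | nil => simp [pvJ_nil]
  | cons t r =>
    simp only [reduceCtorEq, if_false]
    rw [PySem.List.enumerate_cons, List.foldl_cons]
    have h0 : ¬ ((0 : Int) ≠ 0) := by simp
    simp only [h0, if_false]
    rw [pvFoldA r (0 + 1) _ _ (by norm_num)]
    have hr : (List.range ((t :: r).length + 1)).map (fun k => pvJ ((t :: r).take k))
        = 0 :: pvL t :: pvP r (pvL t) := by
      rw [List.length_cons, List.range_succ_eq_map, List.map_cons, List.map_map]
      congr 1
      rw [← pvRHS t r]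
      apply List.map_congr_left
      intro k _
      simp [Function.comp]
    rw [hr]
    simp [pvL]

-- ===== VERDICT (by name: the statement is the Claim_ definition above) =====
theorem prefix_char_offsets_py_spec : Claim_equal_prefix_char_offsets_py := by
  intro tokens _
  unfold Spec_prefix_char_offsets_py
  exact prefix_char_offsets_py_eq tokens
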